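-- pv_equiv track=rewrite | github.com/LokmaneBenhammadi/url_detection | src/features.py | is_legitimate_domain
-- ===== SOURCE A (Python) =====
-- LEGITIMATE_DOMAINS = {
--     'google.com', 'youtube.com', 'facebook.com', 'wikipedia.org',
--     'amazon.com', 'twitter.com', 'instagram.com', 'linkedin.com',
--     'reddit.com', 'github.com', 'stackoverflow.com', 'medium.com',
--     'apple.com', 'microsoft.com', 'github.io', 'wordpress.com',
--     'mozilla.org', 'w3.org', 'w3schools.com', 'npmjs.com',
--     'docker.com', 'kubernetes.io', 'tensorflow.org', 'pytorch.org',
--     'pixabay.com', 'unsplash.com', 'pexels.com', 'freepik.com',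
--     'bbc.com', 'cnn.com', 'reuters.com', 'bbc.co.uk',
--     'gov.uk', 'gov.us', 'edu', 'org', 'net',  # Common suffixes
-- }
--
-- def is_legitimate_domain(domain: str) -> bool:
--     """Check if a domain is in the whitelist of known-legitimate sites."""
--     if not domain:
--         return False
--     domain_lower = domain.lower().strip()
--     # Remove www prefix for matching
--     if domain_lower.startswith('www.'):
--         domain_lower = domain_lower[4:]
--
--     # Exact match or suffix match
--     if domain_lower in LEGITIMATE_DOMAINS:
--         return True
--     # Check if it's a subdomain of a legitimate domain
--     for legit in LEGITIMATE_DOMAINS: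
--         if domain_lower.endswith('.' + legit):
--             return True
--         if domain_lower == legit:
--             return True
--     return False
-- ===== SOURCE B (Python) =====
-- LEGITIMATE_DOMAINS = {
--     'google.com', 'youtube.com', 'facebook.com', 'wikipedia.org',
--     'amazon.com', 'twitter.com', 'instagram.com', 'linkedin.com',
--     'reddit.com', 'github.com', 'stackoverflow.com', 'medium.com',
--     'apple.com', 'microsoft.com', 'github.io', 'wordpress.com',
--     'mozilla.org', 'w3.org', 'w3schools.com', 'npmjs.com',
--     'docker.com', 'kubernetes.io', 'tensorflow.org', 'pytorch.org',
--     'pixabay.com', 'unsplash.com', 'pexels.com', 'freepik.com',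
--     'bbc.com', 'cnn.com', 'reuters.com', 'bbc.co.uk',
--     'gov.uk', 'gov.us', 'edu', 'org', 'net',
-- }
--
-- def is_legitimate_domain(domain: str) -> bool:
--     """Check if a domain is in the whitelist of known-legitimate sites."""
--     if not domain:
--         return False
--     d = domain.lower().strip()
--     if d.startswith('www.'):
--         d = d[4:]
--     # Check every dot-boundary suffix of the domain itself against the set:
--     # parts[0:] is the whole domain (covers the exact match), parts[i:] for
--     # i > 0 is exactly what follows some '.' (covers A's endswith('.'+legit)).
--     parts = d.split('.')
--     return any('.'.join(parts[i:]) in LEGITIMATE_DOMAINS for i in range(len(parts)))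
-- ===== Notes on version B (the rewrite author's own statement) =====
-- stated objective: alternative
-- what changed: Instead of scanning the 36-entry whitelist testing endswith('.'+legit) for each entry, B splits the domain on '.' and tests each dot-boundary suffix ('.'.join(parts[i:])) for membership in the whitelist set, so the loop runs over the domain's own segments rather than over the whitelist.
import Mathlib
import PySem

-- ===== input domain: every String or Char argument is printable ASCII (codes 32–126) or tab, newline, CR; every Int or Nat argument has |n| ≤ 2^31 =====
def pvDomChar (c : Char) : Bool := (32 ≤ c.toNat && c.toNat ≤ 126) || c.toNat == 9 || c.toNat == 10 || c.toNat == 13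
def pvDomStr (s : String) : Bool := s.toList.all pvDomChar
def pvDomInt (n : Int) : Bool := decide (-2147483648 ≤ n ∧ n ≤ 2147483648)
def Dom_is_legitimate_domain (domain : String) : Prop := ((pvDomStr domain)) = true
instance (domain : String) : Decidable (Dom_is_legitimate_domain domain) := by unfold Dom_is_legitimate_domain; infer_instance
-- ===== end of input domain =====

-- B splits the normalized domain on '.' and tests each dot-boundary suffix for whitelist
-- membership, instead of scanning the whitelist with endswith as A does (objective: alternative).

-- the module-level whitelist, as the distinct elements of the Python set (char lists)
def LEGITIMATE_DOMAINS : List (List Char) :=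
  ["google.com".toList, "youtube.com".toList, "facebook.com".toList, "wikipedia.org".toList,
   "amazon.com".toList, "twitter.com".toList, "instagram.com".toList, "linkedin.com".toList,
   "reddit.com".toList, "github.com".toList, "stackoverflow.com".toList, "medium.com".toList,
   "apple.com".toList, "microsoft.com".toList, "github.io".toList, "wordpress.com".toList,
   "mozilla.org".toList, "w3.org".toList, "w3schools.com".toList, "npmjs.com".toList,
   "docker.com".toList, "kubernetes.io".toList, "tensorflow.org".toList, "pytorch.org".toList,
   "pixabay.com".toList, "unsplash.com".toList, "pexels.com".toList, "freepik.com".toList,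
   "bbc.com".toList, "cnn.com".toList, "reuters.com".toList, "bbc.co.uk".toList,
   "gov.uk".toList, "gov.us".toList, "edu".toList, "org".toList, "net".toList]

-- ===== PORT A =====
-- 'for legit in LEGITIMATE_DOMAINS: …' — any-match over the set; iteration order cannot affect the result
def loopA : List (List Char) → List Char → Bool
  | [], _ => false
  | legit :: rest, d =>
    if PySem.Chars.endswith d ('.' :: legit) then true
    else if d = legit then true
    else loopA rest d

def is_legitimate_domain (domain : String) : Bool :=
  if domain.toList = [] then false
  else
    let dl := PySem.Chars.strip (PySem.Chars.lower domain.toList)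
    let dl := if PySem.Chars.startswith dl "www.".toList then dl.drop 4 else dl  -- dl[4:]
    if LEGITIMATE_DOMAINS.contains dl then true
    else loopA LEGITIMATE_DOMAINS dl

-- ===== PORT B =====
-- 'any('.'.join(parts[i:]) in LEGITIMATE_DOMAINS for i in range(len(parts)))' —
-- the tails parts[i:] are enumerated by structural recursion over the parts list
def checkParts : List (List Char) → Bool
  | [] => false
  | p :: ps => LEGITIMATE_DOMAINS.contains (PySem.Chars.join ['.'] (p :: ps)) || checkParts ps

def is_legitimate_domain_alt (domain : String) : Bool :=
  if domain.toList = [] then false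
  else
    let d := PySem.Chars.strip (PySem.Chars.lower domain.toList)
    let d := if PySem.Chars.startswith d "www.".toList then PySem.Chars.slice d (some 4) none else d  -- d[4:]
    checkParts (PySem.Chars.splitOn d ['.'])

-- ===== PRECONDITION & SPEC =====
def Spec_is_legitimate_domain (domain : String) (out : Bool) : Prop := out = is_legitimate_domain_alt domain
instance (domain : String) (out : Bool) : Decidable (Spec_is_legitimate_domain domain out) := by unfold Spec_is_legitimate_domain; infer_instance

-- ===== CLAIM (what is proved, stated in full; the proofs are below) =====
def Claim_equal_is_legitimate_domain : Prop := ∀ (domain : String), Dom_is_legitimate_domain domain → Spec_is_legitimate_domain domain (is_legitimate_domain domain)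

-- ===== LEMMAS AND PROOFS =====

-- A's loop returns true iff some whitelist entry is a dotted suffix of d or equals d
theorem loopA_iff (L : List (List Char)) (d : List Char) :
    loopA L d = true ↔ ∃ l ∈ L, ('.' :: l) <:+ d ∨ d = l := by
  induction L with
  | nil => simp [loopA]
  | cons x rest ih =>
    simp only [loopA]
    split_ifs with h1 h2
    · simp only [true_iff]
      exact ⟨x, by simp, Or.inl ((PySem.Chars.endswith_iff d ('.' :: x)).mp h1)⟩
    · exact ⟨fun _ => ⟨x, by simp, Or.inr h2⟩, fun _ => rfl⟩
    · rw [ih]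
      constructor
      · rintro ⟨l, hl, hc⟩; exact ⟨l, by simp [hl], hc⟩
      · rintro ⟨l, hl, hc⟩
        rcases List.mem_cons.mp hl with rfl | hl'
        · rcases hc with hs | rfl
          · exact absurd ((PySem.Chars.endswith_iff d ('.' :: l)).mpr hs) (by simp [h1])
          · exact absurd rfl h2
        · exact ⟨l, hl', hc⟩

-- a simple structural model of splitting on '.'
def mySplit : List Char → List (List Char)
  | [] => [[]]
  | c :: rest => if c = '.' then [] :: mySplit rest else (mySplit rest).modifyHead (c :: ·)

theorem mySplit_ne_nil (d : List Char) : mySplit d ≠ [] := by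
  induction d with
  | nil => simp [mySplit]
  | cons c rest ih =>
    simp only [mySplit]
    split_ifs
    · simp
    · rcases h : mySplit rest with _ | ⟨x, xs⟩
      · exact absurd h ih
      · simp [List.modifyHead]

theorem go_eq (fuel : Nat) (l cur : List Char) (acc : List (List Char)) (hf : l.length ≤ fuel) :
    PySem.Chars.splitOn.go ['.'] fuel l cur acc =
      acc.reverse ++ (mySplit l).modifyHead (cur.reverse ++ ·) := by
  induction fuel generalizing l cur acc with
  | zero =>
    have : l = [] := List.length_eq_zero_iff.mp (Nat.le_zero.mp hf)
    subst this
    simp [PySem.Chars.splitOn.go, mySplit, List.modifyHead]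
  | succ fuel ih =>
    cases l with
    | nil => simp [PySem.Chars.splitOn.go, mySplit, List.modifyHead]
    | cons c rest =>
      rw [PySem.Chars.splitOn.go]
      by_cases hc : c = '.'
      · subst hc
        have hpre : List.isPrefixOf ['.'] ('.' :: rest) = true := by
          simp [List.isPrefixOf]
        rw [if_pos hpre]
        simp only [List.length_cons] at hf
        simp only [List.length_singleton, List.drop_one, List.tail_cons]
        rw [ih rest [] _ (by omega)]
        rcases hms : mySplit rest with _ | ⟨x, xs⟩
        · exact absurd hms (mySplit_ne_nil rest)
        · simp [mySplit, hms, List.modifyHead]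
      · have hpre : List.isPrefixOf ['.'] (c :: rest) = false := by
          simp [List.isPrefixOf]
          exact fun h => hc h.symm
        rw [if_neg (by simp [hpre])]
        simp only [List.length_cons] at hf
        rw [ih rest (c :: cur) acc (by omega)]
        rcases hms : mySplit rest with _ | ⟨x, xs⟩
        · exact absurd hms (mySplit_ne_nil rest)
        · simp [mySplit, hc, hms, List.modifyHead]

theorem splitOn_eq_mySplit (d : List Char) : PySem.Chars.splitOn d ['.'] = mySplit d := by
  rw [PySem.Chars.splitOn, go_eq (d.length + 1) d [] [] (by omega)]
  rcases hms : mySplit d with _ | ⟨x, xs⟩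
  · exact absurd hms (mySplit_ne_nil d)
  · simp [List.modifyHead]

-- joining a list whose head got a char prepended
theorem join_cons_head (c : Char) (x : List Char) (xs : List (List Char)) :
    PySem.Chars.join ['.'] ((c :: x) :: xs) = c :: PySem.Chars.join ['.'] (x :: xs) := by
  cases xs with
  | nil => simp [PySem.Chars.join_singleton]
  | cons y ys => simp [PySem.Chars.join_cons_cons]

theorem join_mySplit (d : List Char) : PySem.Chars.join ['.'] (mySplit d) = d := by
  induction d with
  | nil => simp [mySplit, PySem.Chars.join_singleton]
  | cons c rest ih =>
    by_cases hc : c = '.'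
    · subst hc
      rcases hms : mySplit rest with _ | ⟨x, xs⟩
      · exact absurd hms (mySplit_ne_nil rest)
      · simp only [mySplit, hms, if_true]
        rw [PySem.Chars.join_cons_cons]
        rw [hms] at ih
        simp [ih]
    · rcases hms : mySplit rest with _ | ⟨x, xs⟩
      · exact absurd hms (mySplit_ne_nil rest)
      · simp only [mySplit, if_neg hc, hms, List.modifyHead]
        rw [join_cons_head]
        rw [hms] at ih
        simp [ih]

-- the non-first tails of mySplit d join to exactly the after-a-dot suffixes of d
theorem checkTail (d : List Char) :
    checkParts ((mySplit d).tail) = true ↔ ∃ l ∈ LEGITIMATE_DOMAINS, ('.' :: l) <:+ d := by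
  induction d with
  | nil => simp [mySplit, checkParts]
  | cons c rest ih =>
    by_cases hc : c = '.'
    · subst hc
      simp only [mySplit, if_true, List.tail_cons]
      rcases hms : mySplit rest with _ | ⟨x, xs⟩
      · exact absurd hms (mySplit_ne_nil rest)
      · rw [hms] at ih
        simp only [checkParts, Bool.or_eq_true]
        have hjoin : PySem.Chars.join ['.'] (x :: xs) = rest := by
          have := join_mySplit rest; rwa [hms] at this
        rw [List.tail_cons] at ih
        rw [hjoin]
        constructor
        · rintro (hm | ht)
          · exact ⟨rest, by simpa [List.contains_eq_mem] using hm, List.suffix_refl _⟩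
          · rcases ih.mp ht with ⟨l, hl, hs⟩
            exact ⟨l, hl, hs.trans (List.suffix_cons _ _)⟩
        · rintro ⟨l, hl, hs⟩
          rcases List.suffix_cons_iff.mp hs with heq | hs'
          · injection heq with _ hr
            subst hr
            exact Or.inl (by simpa [List.contains_eq_mem] using hl)
          · exact Or.inr (ih.mpr ⟨l, hl, hs'⟩)
    · rcases hms : mySplit rest with _ | ⟨x, xs⟩
      · exact absurd hms (mySplit_ne_nil rest)
      · simp only [mySplit, if_neg hc, hms, List.modifyHead, List.tail_cons]
        rw [hms, List.tail_cons] at ih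
        rw [ih]
        constructor
        · rintro ⟨l, hl, hs⟩; exact ⟨l, hl, hs.trans (List.suffix_cons _ _)⟩
        · rintro ⟨l, hl, hs⟩
          rcases List.suffix_cons_iff.mp hs with heq | hs'
          · injection heq with h1 _; exact absurd h1.symm hc
          · exact ⟨l, hl, hs'⟩

-- B's check over the split equals "exact member or some dotted suffix is a member"
theorem checkParts_mySplit (d : List Char) :
    checkParts (mySplit d) =
      (LEGITIMATE_DOMAINS.contains d ||
        decide (∃ l ∈ LEGITIMATE_DOMAINS, ('.' :: l) <:+ d)) := by
  rcases hms : mySplit d with _ | ⟨x, xs⟩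
  · exact absurd hms (mySplit_ne_nil d)
  · have hjoin : PySem.Chars.join ['.'] (x :: xs) = d := by
      have := join_mySplit d; rwa [hms] at this
    have htail := checkTail d
    rw [hms, List.tail_cons] at htail
    simp only [checkParts, hjoin]
    rcases hcp : checkParts xs with _ | _
    · simp only [Bool.or_false]
      have : ¬ ∃ l ∈ LEGITIMATE_DOMAINS, ('.' :: l) <:+ d := fun h =>
        by simp [htail.mpr h] at hcp
      simp [this]
    · simp [htail.mp hcp]

-- A's whole tail (membership check then loop) equals B's check over the split
theorem tails_agree (d : List Char) :
    (if LEGITIMATE_DOMAINS.contains d then true else loopA LEGITIMATE_DOMAINS d) =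
    checkParts (PySem.Chars.splitOn d ['.']) := by
  rw [splitOn_eq_mySplit, checkParts_mySplit]
  by_cases hm : LEGITIMATE_DOMAINS.contains d = true
  · rw [if_pos hm, hm]
    simp
  · rw [if_neg hm]
    rw [Bool.not_eq_true] at hm
    rw [hm, Bool.false_or]
    rcases hA : loopA LEGITIMATE_DOMAINS d with _ | _
    · have : ¬ ∃ l ∈ LEGITIMATE_DOMAINS, ('.' :: l) <:+ d := fun ⟨l, hl, hs⟩ =>
        by simp [(loopA_iff _ d).mpr ⟨l, hl, Or.inl hs⟩] at hA
      exact (decide_eq_false this).symm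
    · rcases (loopA_iff _ d).mp hA with ⟨l, hl, hs | rfl⟩
      · exact (decide_eq_true ⟨l, hl, hs⟩).symm
      · exact absurd hm (by simp [List.contains_eq_mem, hl])

-- the two www-stripping phrasings produce the same normalized domain
theorem slice_four (d : List Char) : PySem.Chars.slice d (some 4) none = d.drop 4 := by
  simp [PySem.Chars.slice_eq_listSlice, PySem.List.slice_from]

-- ===== VERDICT (by name: the statement is the Claim_ definition above) =====
theorem is_legitimate_domain_spec : Claim_equal_is_legitimate_domain := by
  intro domain _
  unfold Spec_is_legitimate_domain is_legitimate_domain is_legitimate_domain_alt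
  by_cases h1 : domain.toList = []
  · simp [h1]
  · rw [if_neg h1, if_neg h1]
    simp only [slice_four]
    exact tails_agree _
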